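-- pv_equiv track=rewrite | github.com/GrumpyBumbleBee/CSCI1913 | project/wordle.py | no_letters
-- ===== SOURCE A (Python) =====
-- def no_letter_assembly_line(current_known, guess_and_clue):
--     """ Helper function for the no_letters() function. Takes in the current known string and the tuple groups from clues passed in. Returns an updated string representing
--      the letters that were not in the secret word given the guess and the current known clues."""
--     updated_known_string = ""
--     updated_known_list = []
--     updated_known_list[:0] = current_known
--     marked_equivalent_letter_and_place = ""
--     for index, color in enumerate(guess_and_clue[1]):
--         if color == 'green' or color == 'yellow':
--             marked_equivalent_letter_and_place += guess_and_clue[0][index]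
--     for index, color in enumerate(guess_and_clue[1]):
--         if color == 'grey' and guess_and_clue[0][index] not in updated_known_list and guess_and_clue[0][index] not in marked_equivalent_letter_and_place:
--             updated_known_list.append(guess_and_clue[0][index])
--     updated_known_list_sorted = sorted(updated_known_list)
--     for item in updated_known_list_sorted:
--         updated_known_string += item
--     return updated_known_string
--
-- def no_letters(clues):
--     """ This function takes in a list containing a record of guesses taken and clues received so far. The output of this function is a string
--     indicating which letters we know are not in the word according to grey hints seen so far. """
--     known_string = ""
--     if clues == []:
--         return known_string
--     else:
--         for tup_groups in clues:
--             if 'grey' in tup_groups[1]: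
--                 known_string = no_letter_assembly_line(known_string, tup_groups)
--     return known_string
-- ===== SOURCE B (Python) =====
-- def no_letters(clues):
--     """Recursive decomposition: the set of known-absent letters of (clue :: rest)
--     is the absent-letters set of rest, unioned with this clue's set difference
--     grey-letters minus green/yellow-letters, computed by zipping word with colors.
--     Sorted and joined exactly once at the top level."""
--     return ''.join(sorted(_absent(clues)))
--
-- def _absent(clues):
--     if not clues:
--         return set()
--     (word, colors), rest = clues[0], clues[1:]
--     acc = _absent(rest)
--     if 'grey' not in colors:
--         return acc
--     pairs = list(zip(word, colors))
--     grey = {ch for ch, c in pairs if c == 'grey'}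
--     keep = {ch for ch, c in pairs if c == 'green' or c == 'yellow'}
--     return acc | (grey - keep)
-- ===== Notes on version B (the rewrite author's own statement) =====
-- stated objective: alternative
-- what changed: Replaced the helper-plus-string-accumulator fold (which rebuilds, re-deduplicates and re-sorts the whole known string per clue via two index loops) by a recursive decomposition: each clue's contribution is the set difference grey-letters minus green/yellow-letters computed by zipping word with colors, unioned with the recursion on the remaining clues, with one sort/join at the top.
import Mathlib
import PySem

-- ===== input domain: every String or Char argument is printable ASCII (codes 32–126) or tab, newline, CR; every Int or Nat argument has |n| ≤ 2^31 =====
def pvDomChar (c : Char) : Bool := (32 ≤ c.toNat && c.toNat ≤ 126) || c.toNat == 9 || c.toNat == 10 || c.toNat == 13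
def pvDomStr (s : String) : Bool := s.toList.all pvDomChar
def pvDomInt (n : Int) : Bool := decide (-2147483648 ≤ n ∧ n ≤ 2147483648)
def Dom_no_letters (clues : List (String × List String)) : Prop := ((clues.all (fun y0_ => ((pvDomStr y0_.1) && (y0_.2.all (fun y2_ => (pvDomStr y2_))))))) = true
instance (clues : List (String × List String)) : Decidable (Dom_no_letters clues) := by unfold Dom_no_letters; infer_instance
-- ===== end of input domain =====

-- B replaces A's per-clue helper (which re-deduplicates and re-sorts the accumulated known string
-- on every clue) by a recursion over the clue list that unions each clue's set difference
-- (grey letters minus green/yellow letters, via zip) and sorts/joins once (objective: alternative).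

-- ===== PORT A =====
-- helper no_letter_assembly_line: literal port (strings handled as their List Char)
def no_letter_assembly_line (current_known : String) (guess_and_clue : String × List String) : String :=
  let updated_known_list0 : List Char := current_known.toList   -- updated_known_list[:0] = current_known
  let marked : List Char :=                                     -- first enumerate loop
    (PySem.List.enumerate guess_and_clue.2).foldl
      (fun acc p =>
        if p.2 = "green" ∨ p.2 = "yellow" then
          acc ++ [(PySem.List.pyGet? guess_and_clue.1.toList p.1).getD ' ']
        else acc) []
  let updated_known_list : List Char :=                         -- second enumerate loop
    (PySem.List.enumerate guess_and_clue.2).foldl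
      (fun acc p =>
        if p.2 = "grey" ∧ (PySem.List.pyGet? guess_and_clue.1.toList p.1).getD ' ' ∉ acc ∧
            (PySem.List.pyGet? guess_and_clue.1.toList p.1).getD ' ' ∉ marked then
          acc ++ [(PySem.List.pyGet? guess_and_clue.1.toList p.1).getD ' ']
        else acc) updated_known_list0
  let updated_known_list_sorted := PySem.List.sorted updated_known_list (fun x => x) false
  String.ofList (updated_known_list_sorted.foldl (fun s c => s ++ [c]) [])   -- for item …: string += item

def no_letters (clues : List (String × List String)) : String :=
  if clues = [] then ""
  else
    clues.foldl
      (fun known_string tup_groups =>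
        if "grey" ∈ tup_groups.2 then no_letter_assembly_line known_string tup_groups
        else known_string) ""

-- ===== PORT B =====
-- helper _absent: recursion over the clue list, per clue zip + two set comprehensions + set ops
def no_letters_absent : List (String × List String) → PySem.Set Char
  | [] => PySem.Set.empty
  | (word, colors) :: rest =>
      let acc := no_letters_absent rest
      if "grey" ∉ colors then acc
      else
        let pairs := word.toList.zip colors
        let grey : PySem.Set Char :=
          PySem.Set.ofList (pairs.filterMap (fun q => if q.2 = "grey" then some q.1 else none))
        let keep : PySem.Set Char :=
          PySem.Set.ofList (pairs.filterMap (fun q => if q.2 = "green" ∨ q.2 = "yellow" then some q.1 else none))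
        PySem.Set.union acc (PySem.Set.diff grey keep)

def no_letters_alt (clues : List (String × List String)) : String :=
  String.ofList (PySem.List.sorted (no_letters_absent clues) (fun x => x) false)

-- ===== PRECONDITION & SPEC =====
-- Pre_ excludes exactly the inputs where Python A raises IndexError: a clue whose color list
-- contains 'grey' and has a 'green'/'yellow'/'grey' entry at an index beyond the end of the word.
def Pre_no_letters (clues : List (String × List String)) : Prop :=
  ∀ p ∈ clues, "grey" ∈ p.2 →
    ∀ q ∈ PySem.List.enumerate p.2,
      (q.2 = "green" ∨ q.2 = "yellow" ∨ q.2 = "grey") → PySem.Raise.InRange p.1.toList.length q.1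
instance (clues : List (String × List String)) : Decidable (Pre_no_letters clues) := by
  unfold Pre_no_letters; infer_instance
def pvWitness_no_letters : (List (String × List String)) :=
  [("cab", ["grey", "green", "grey"]), ("xy", ["blue"])]

def Spec_no_letters (clues : List (String × List String)) (out : String) : Prop := out = no_letters_alt clues
instance (clues : List (String × List String)) (out : String) : Decidable (Spec_no_letters clues out) := by unfold Spec_no_letters; infer_instance

-- ===== CLAIM (what is proved, stated in full; the proofs are below) =====
def Claim_equal_no_letters : Prop := ∀ (clues : List (String × List String)), Dom_no_letters clues → Pre_no_letters clues → Spec_no_letters clues (no_letters clues)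

-- ===== LEMMAS AND PROOFS =====

-- membership through a conditional Set.add loop (the condition does not read the accumulator)
lemma mem_foldl_add_if {α β : Type} [DecidableEq α] [BEq α] [LawfulBEq α]
    (l : List β) (C : β → Prop) [DecidablePred C] (f : β → α) (s : List α) (y : α) :
    y ∈ l.foldl (fun s p => if C p then PySem.Set.add s (f p) else s) s ↔
      y ∈ s ∨ ∃ p ∈ l, C p ∧ y = f p := by
  induction l generalizing s with
  | nil => simp
  | cons h t ih =>
    simp only [List.foldl_cons]
    by_cases hc : C h
    · rw [if_pos hc, ih]
      simp only [PySem.Set.mem_add, List.mem_cons]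
      constructor
      · rintro ((h1 | h2) | ⟨p, hp, hcp, hy⟩)
        · exact Or.inl h1
        · exact Or.inr ⟨h, Or.inl rfl, hc, h2⟩
        · exact Or.inr ⟨p, Or.inr hp, hcp, hy⟩
      · rintro (h1 | ⟨p, (rfl | hp), hcp, hy⟩)
        · exact Or.inl (Or.inl h1)
        · exact Or.inl (Or.inr hy)
        · exact Or.inr ⟨p, hp, hcp, hy⟩
    · rw [if_neg hc, ih]
      simp only [List.mem_cons]
      constructor
      · rintro (h1 | ⟨p, hp, hcp, hy⟩)
        · exact Or.inl h1
        · exact Or.inr ⟨p, Or.inr hp, hcp, hy⟩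
      · rintro (h1 | ⟨p, (rfl | hp), hcp, hy⟩)
        · exact Or.inl h1
        · exact absurd hcp hc
        · exact Or.inr ⟨p, hp, hcp, hy⟩

lemma nodup_foldl_add_if {α β : Type} [DecidableEq α] [BEq α] [LawfulBEq α]
    (l : List β) (C : β → Prop) [DecidablePred C] (f : β → α) (s : List α) (hs : s.Nodup) :
    (l.foldl (fun s p => if C p then PySem.Set.add s (f p) else s) s).Nodup := by
  induction l generalizing s with
  | nil => exact hs
  | cons h t ih =>
    simp only [List.foldl_cons]
    by_cases hc : C h
    · rw [if_pos hc]; exact ih _ (PySem.Set.nodup_add s (f h) hs)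
    · rw [if_neg hc]; exact ih _ hs

-- membership through a conditional append loop (the condition does not read the accumulator)
lemma mem_foldl_append_if {α β : Type} (l : List β) (C : β → Prop) [DecidablePred C]
    (f : β → α) (acc : List α) (y : α) :
    y ∈ l.foldl (fun acc p => if C p then acc ++ [f p] else acc) acc ↔
      y ∈ acc ∨ ∃ p ∈ l, C p ∧ y = f p := by
  induction l generalizing acc with
  | nil => simp
  | cons h t ih =>
    simp only [List.foldl_cons]
    by_cases hc : C h
    · rw [if_pos hc, ih]
      simp only [List.mem_append, List.mem_cons, List.not_mem_nil, or_false]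
      constructor
      · rintro ((h1 | h2) | ⟨p, hp, hcp, hy⟩)
        · exact Or.inl h1
        · exact Or.inr ⟨h, Or.inl rfl, hc, h2⟩
        · exact Or.inr ⟨p, Or.inr hp, hcp, hy⟩
      · rintro (h1 | ⟨p, (rfl | hp), hcp, hy⟩)
        · exact Or.inl (Or.inl h1)
        · exact Or.inl (Or.inr hy)
        · exact Or.inr ⟨p, hp, hcp, hy⟩
    · rw [if_neg hc, ih]
      simp only [List.mem_cons]
      constructor
      · rintro (h1 | ⟨p, hp, hcp, hy⟩)
        · exact Or.inl h1
        · exact Or.inr ⟨p, Or.inr hp, hcp, hy⟩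
      · rintro (h1 | ⟨p, (rfl | hp), hcp, hy⟩)
        · exact Or.inl h1
        · exact absurd hcp hc
        · exact Or.inr ⟨p, hp, hcp, hy⟩

-- Python's sorted of a duplicate-free list is strictly increasing
lemma sorted_nodup_pairwise_lt (l : List Char) (hl : l.Nodup) :
    (PySem.List.sorted l (fun x => x) false).Pairwise (· < ·) := by
  have hp := PySem.List.sorted_pairwise (xs := l) (key := fun x : Char => x)
  have hperm := PySem.List.sorted_perm l (fun x : Char => x) false
  have hnd := hperm.nodup_iff.mpr hl
  exact (hp.and hnd).imp (fun h => lt_of_le_of_ne h.1 h.2)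

-- which letters ONE clue contributes in A's helper, as a predicate on the input
def cluePicks (tg : String × List String) (P : String → Prop) (c : Char) : Prop :=
  ∃ q ∈ PySem.List.enumerate tg.2, P q.2 ∧ c = (PySem.List.pyGet? tg.1.toList q.1).getD ' '

-- A's helper: keeps the state strictly sorted and adds exactly the grey-not-marked letters
lemma step_char (ks : String) (tg : String × List String)
    (h1 : ks.toList.Pairwise (· < ·)) :
    (no_letter_assembly_line ks tg).toList.Pairwise (· < ·) ∧
    (∀ c, c ∈ (no_letter_assembly_line ks tg).toList ↔
      c ∈ ks.toList ∨ (cluePicks tg (fun s => s = "grey") c ∧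
        ¬ cluePicks tg (fun s => s = "green" ∨ s = "yellow") c)) := by
  have hknd : ks.toList.Nodup := h1.imp (fun h => ne_of_lt h)
  -- the marked string's members
  have hmk : ∀ c : Char,
      (c ∈ (PySem.List.enumerate tg.2).foldl
        (fun acc p =>
          if p.2 = "green" ∨ p.2 = "yellow" then
            acc ++ [(PySem.List.pyGet? tg.1.toList p.1).getD ' ']
          else acc) ([] : List Char)) ↔
      cluePicks tg (fun s => s = "green" ∨ s = "yellow") c := by
    intro c
    rw [mem_foldl_append_if]; simp [cluePicks]
  -- A's second loop with its "not already in the accumulator" guard IS a conditional Set.add loop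
  have hA2 :
      (PySem.List.enumerate tg.2).foldl
        (fun acc p =>
          if p.2 = "grey" ∧ (PySem.List.pyGet? tg.1.toList p.1).getD ' ' ∉ acc ∧
              (PySem.List.pyGet? tg.1.toList p.1).getD ' ' ∉
                ((PySem.List.enumerate tg.2).foldl
                  (fun acc p =>
                    if p.2 = "green" ∨ p.2 = "yellow" then
                      acc ++ [(PySem.List.pyGet? tg.1.toList p.1).getD ' ']
                    else acc) ([] : List Char)) then
            acc ++ [(PySem.List.pyGet? tg.1.toList p.1).getD ' ']
          else acc) ks.toList
      = (PySem.List.enumerate tg.2).foldl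
        (fun s p =>
          if p.2 = "grey" ∧ (PySem.List.pyGet? tg.1.toList p.1).getD ' ' ∉
              ((PySem.List.enumerate tg.2).foldl
                (fun acc p =>
                  if p.2 = "green" ∨ p.2 = "yellow" then
                    acc ++ [(PySem.List.pyGet? tg.1.toList p.1).getD ' ']
                  else acc) ([] : List Char)) then
            PySem.Set.add s ((PySem.List.pyGet? tg.1.toList p.1).getD ' ')
          else s) ks.toList := by
    apply PySem.List.foldl_congr_mem
    intro a x _
    by_cases hc1 : x.2 = "grey"
    · by_cases hc2 : (PySem.List.pyGet? tg.1.toList x.1).getD ' ' ∈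
        ((PySem.List.enumerate tg.2).foldl
          (fun acc p =>
            if p.2 = "green" ∨ p.2 = "yellow" then
              acc ++ [(PySem.List.pyGet? tg.1.toList p.1).getD ' ']
            else acc) ([] : List Char))
      · simp [hc1, hc2]
      · by_cases hm : (PySem.List.pyGet? tg.1.toList x.1).getD ' ' ∈ a
        · simp [hc1, hc2, hm]
        · simp [hc1, hc2, hm]
    · simp [hc1]
  have hLnd :
      ((PySem.List.enumerate tg.2).foldl
        (fun s p =>
          if p.2 = "grey" ∧ (PySem.List.pyGet? tg.1.toList p.1).getD ' ' ∉
              ((PySem.List.enumerate tg.2).foldl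
                (fun acc p =>
                  if p.2 = "green" ∨ p.2 = "yellow" then
                    acc ++ [(PySem.List.pyGet? tg.1.toList p.1).getD ' ']
                  else acc) ([] : List Char)) then
            PySem.Set.add s ((PySem.List.pyGet? tg.1.toList p.1).getD ' ')
          else s) ks.toList).Nodup :=
    nodup_foldl_add_if _ _ _ _ hknd
  refine ⟨?_, ?_⟩ <;>
    simp only [no_letter_assembly_line, PySem.List.foldl_append_singleton_eq_self,
      List.nil_append, String.toList_ofList, hA2]
  · exact sorted_nodup_pairwise_lt _ hLnd
  · intro c
    rw [PySem.List.mem_sorted, mem_foldl_add_if]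
    constructor
    · rintro (h | ⟨p, hp, ⟨hg, hm⟩, hy⟩)
      · exact Or.inl h
      · exact Or.inr ⟨⟨p, hp, hg, hy⟩, fun hk => hm (hy ▸ ((hmk c).mpr hk))⟩
    · rintro (h | ⟨⟨p, hp, hg, hy⟩, hm⟩)
      · exact Or.inl h
      · exact Or.inr ⟨p, hp, ⟨hg, fun hk => hm ((hmk c).mp (by rw [hy]; exact hk))⟩, hy⟩
-- A's whole fold: strictly sorted, members = union of the clues' contributions
lemma foldA_char (clues : List (String × List String)) (ks : String)
    (h1 : ks.toList.Pairwise (· < ·)) :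
    (clues.foldl
      (fun known_string tup_groups =>
        if "grey" ∈ tup_groups.2 then no_letter_assembly_line known_string tup_groups
        else known_string) ks).toList.Pairwise (· < ·) ∧
    (∀ c, c ∈ (clues.foldl
      (fun known_string tup_groups =>
        if "grey" ∈ tup_groups.2 then no_letter_assembly_line known_string tup_groups
        else known_string) ks).toList ↔
      c ∈ ks.toList ∨ ∃ p ∈ clues, "grey" ∈ p.2 ∧
        cluePicks p (fun s => s = "grey") c ∧
        ¬ cluePicks p (fun s => s = "green" ∨ s = "yellow") c) := by
  induction clues generalizing ks with
  | nil => simpa using h1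
  | cons tg rest ih =>
    simp only [List.foldl_cons]
    by_cases hg : "grey" ∈ tg.2
    · rw [if_pos hg]
      obtain ⟨s1, s2⟩ := step_char ks tg h1
      obtain ⟨i1, i2⟩ := ih (no_letter_assembly_line ks tg) s1
      refine ⟨i1, fun c => ?_⟩
      rw [i2, s2]
      simp only [List.mem_cons]
      constructor
      · rintro ((h | h) | ⟨p, hp, hc⟩)
        · exact Or.inl h
        · exact Or.inr ⟨tg, Or.inl rfl, hg, h⟩
        · exact Or.inr ⟨p, Or.inr hp, hc⟩
      · rintro (h | ⟨p, (rfl | hp), hgp, hc⟩)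
        · exact Or.inl (Or.inl h)
        · exact Or.inl (Or.inr hc)
        · exact Or.inr ⟨p, hp, hgp, hc⟩
    · rw [if_neg hg]
      obtain ⟨i1, i2⟩ := ih ks h1
      refine ⟨i1, fun c => ?_⟩
      rw [i2]
      simp only [List.mem_cons]
      constructor
      · rintro (h | ⟨p, hp, hc⟩)
        · exact Or.inl h
        · exact Or.inr ⟨p, Or.inr hp, hc⟩
      · rintro (h | ⟨p, (rfl | hp), hgp, hc⟩)
        · exact Or.inl h
        · exact absurd hgp hg
        · exact Or.inr ⟨p, hp, hgp, hc⟩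

-- zip-based set comprehension vs index-based selection, under the in-range hypothesis
lemma mem_filterMap_zip_iff (w : List Char) (cs : List String) (P : String → Prop)
    [DecidablePred P]
    (hr : ∀ q ∈ PySem.List.enumerate cs, P q.2 → PySem.Raise.InRange w.length q.1) (c : Char) :
    c ∈ (w.zip cs).filterMap (fun q => if P q.2 then some q.1 else none) ↔
      ∃ q ∈ PySem.List.enumerate cs, P q.2 ∧ c = (PySem.List.pyGet? w q.1).getD ' ' := by
  simp only [List.mem_filterMap, Option.ite_none_right_eq_some, Option.some.injEq]
  constructor
  · rintro ⟨p, hp, hP, hc⟩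
    obtain ⟨k, hk, hpe⟩ := List.mem_iff_getElem.mp hp
    rw [List.getElem_zip] at hpe
    have hkw : k < w.length := lt_of_lt_of_le hk (by simp [List.length_zip])
    have hkc : k < cs.length := lt_of_lt_of_le hk (by simp [List.length_zip])
    refine ⟨((k : Int), cs[k]), ?_, ?_, ?_⟩
    · rw [PySem.List.mem_enumerate_iff]
      exact ⟨k, hkc, by simp⟩
    · show P cs[k]
      rw [show cs[k] = p.2 from congrArg Prod.snd hpe]; exact hP
    · rw [PySem.List.pyGet?_natCast]
      simp only [List.getElem?_eq_getElem hkw, Option.getD_some]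
      rw [← hc, ← hpe]
  · rintro ⟨q, hq, hP, hc⟩
    rw [PySem.List.mem_enumerate_iff] at hq
    obtain ⟨k, hkc, rfl⟩ := hq
    have hir := hr ((0 : Int) + k, cs[k]) (by rw [PySem.List.mem_enumerate_iff]; exact ⟨k, hkc, rfl⟩) hP
    have hkw : k < w.length := by
      simp only [PySem.Raise.InRange] at hir
      omega
    refine ⟨(w[k], cs[k]), ?_, hP, ?_⟩
    · exact List.mem_iff_getElem.mpr ⟨k, by simp [List.length_zip, hkw, hkc], List.getElem_zip ..⟩
    · rw [hc]
      have : ((0 : Int) + (k : Int)) = (k : Int) := by omega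
      rw [this, PySem.List.pyGet?_natCast]
      simp [List.getElem?_eq_getElem hkw]

-- B's recursion: no duplicates, members = union of the clues' contributions
lemma absent_char (clues : List (String × List String))
    (hpre : Pre_no_letters clues) :
    (no_letters_absent clues).Nodup ∧
    (∀ c, c ∈ no_letters_absent clues ↔
      ∃ p ∈ clues, "grey" ∈ p.2 ∧
        cluePicks p (fun s => s = "grey") c ∧
        ¬ cluePicks p (fun s => s = "green" ∨ s = "yellow") c) := by
  induction clues with
  | nil => simp [no_letters_absent, PySem.Set.empty]
  | cons tg rest ih =>
    have hpre' : Pre_no_letters rest := fun p hp => hpre p (List.mem_cons_of_mem _ hp)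
    obtain ⟨i1, i2⟩ := ih hpre'
    obtain ⟨w, cs⟩ := tg
    by_cases hg : "grey" ∈ cs
    · have hr : ∀ q ∈ PySem.List.enumerate cs,
          (q.2 = "green" ∨ q.2 = "yellow" ∨ q.2 = "grey") →
          PySem.Raise.InRange w.toList.length q.1 :=
        hpre (w, cs) (List.mem_cons_self) hg
      have hgrey := fun c => mem_filterMap_zip_iff w.toList cs (fun s => s = "grey")
        (fun q hq hP => hr q hq (Or.inr (Or.inr hP))) c
      have hkeep := fun c => mem_filterMap_zip_iff w.toList cs
        (fun s => s = "green" ∨ s = "yellow")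
        (fun q hq hP => hr q hq (hP.imp id Or.inl)) c
      constructor
      · show (no_letters_absent ((w, cs) :: rest)).Nodup
        simp only [no_letters_absent, if_neg (not_not_intro hg)]
        exact PySem.Set.nodup_union _ _ i1
      · intro c
        show c ∈ no_letters_absent ((w, cs) :: rest) ↔ _
        simp only [no_letters_absent, if_neg (not_not_intro hg)]
        rw [PySem.Set.mem_union, PySem.Set.mem_diff, PySem.Set.mem_ofList,
          PySem.Set.mem_ofList, i2, hgrey, hkeep]
        simp only [List.mem_cons, cluePicks]
        constructor
        · rintro (⟨p, hp, hc⟩ | ⟨h1', h2'⟩)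
          · exact ⟨p, Or.inr hp, hc⟩
          · exact ⟨(w, cs), Or.inl rfl, hg, h1', h2'⟩
        · rintro ⟨p, (rfl | hp), hgp, hc⟩
          · exact Or.inr hc
          · exact Or.inl ⟨p, hp, hgp, hc⟩
    · constructor
      · show (no_letters_absent ((w, cs) :: rest)).Nodup
        simpa only [no_letters_absent, if_pos hg] using i1
      · intro c
        show c ∈ no_letters_absent ((w, cs) :: rest) ↔ _
        simp only [no_letters_absent, if_pos hg]
        rw [i2]
        simp only [List.mem_cons]
        constructor
        · rintro ⟨p, hp, hc⟩; exact ⟨p, Or.inr hp, hc⟩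
        · rintro ⟨p, (rfl | hp), hgp, hc⟩
          · exact absurd hgp hg
          · exact ⟨p, hp, hgp, hc⟩

-- ===== VERDICT (by name: the statement is the Claim_ definition above) =====
theorem no_letters_spec : Claim_equal_no_letters := by
  intro clues _ hpre
  unfold Spec_no_letters no_letters no_letters_alt
  by_cases hc : clues = []
  · subst hc; decide
  · rw [if_neg hc]
    obtain ⟨hA1, hA2⟩ := foldA_char clues "" (by simp)
    obtain ⟨hB1, hB2⟩ := absent_char clues hpre
    have hnd := hA1.imp (fun h => ne_of_lt h)
    have hm : ∀ c, c ∈ (clues.foldl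
        (fun known_string tup_groups =>
          if "grey" ∈ tup_groups.2 then no_letter_assembly_line known_string tup_groups
          else known_string) "").toList ↔ c ∈ no_letters_absent clues := by
      intro c; rw [hA2, hB2]; simp
    have hperm := (List.perm_ext_iff_of_nodup hnd hB1).mpr hm
    have hs := PySem.List.sorted_eq_of_perm_of_pairwise_lt _ _ (fun x : Char => x) hperm hA1
    exact ((congrArg String.ofList hs).trans String.ofList_toList).symm
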